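-- pv_equiv track=rewrite | github.com/milankwiatkowski/wspolbiezne | lab_10/file.py | germain_sequential
-- ===== SOURCE A (Python) =====
-- import math
--
-- def primes_up_to(n: int) -> list[int]:
--     """Sito Eratostenesa do n (włącznie)."""
--     if n < 2:
--         return []
--     sieve = bytearray(b"\x01") * (n + 1)
--     sieve[0:2] = b"\x00\x00"
--     limit = int(math.isqrt(n))
--     for p in range(2, limit + 1):
--         if sieve[p]:
--             step = p
--             start = p * p
--             sieve[start:n + 1:step] = b"\x00" * (((n - start) // step) + 1)
--     return [i for i in range(2, n + 1) if sieve[i]]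
--
-- def is_prime_with_small_primes(k: int, small_primes: list[int]) -> bool:
--     """Test pierwszości k używając listy małych liczb pierwszych."""
--     if k < 2:
--         return False
--     for p in small_primes:
--         if p * p > k:
--             return True
--         if k % p == 0:
--             return k == p
--     # jeśli small_primes nie dosięgały do sqrt(k) (teoretycznie nie powinno tu wejść)
--     return True
--
-- def germain_sequential(l: int, r: int) -> list[int]:
--     # musimy testować też 2p+1, więc small primes do sqrt(2r+1)
--     max_q = 2 * r + 1
--     sp = primes_up_to(int(math.isqrt(max_q)) + 1)
--
--     out = []
--     for p in range(l, r + 1):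
--         if is_prime_with_small_primes(p, sp):
--             q = 2 * p + 1
--             if is_prime_with_small_primes(q, sp):
--                 out.append(p)
--     return out
-- ===== SOURCE B (Python) =====
-- import math
--
-- def germain_sequential(l: int, r: int) -> list[int]:
--     # One sieve of Eratosthenes up to n = 2r+1; then each candidate p in [l, r]
--     # is a Germain prime iff sieve[p] and sieve[2p+1] -- plain lookups instead
--     # of per-candidate trial division.
--     n = 2 * r + 1
--     if n < 5:  # smallest Germain prime is 2, needing 2*2+1 = 5 <= n
--         return []
--     is_p = [True] * (n + 1)
--     is_p[0] = is_p[1] = False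
--     for i in range(2, math.isqrt(n) + 1):
--         if is_p[i]:
--             for m in range(i * i, n + 1, i):
--                 is_p[m] = False
--     return [p for p in range(max(l, 2), r + 1) if is_p[p] and is_p[2 * p + 1]]
-- ===== Notes on version B (the rewrite author's own statement) =====
-- stated objective: alternative
-- what changed: Instead of trial-dividing every candidate p and 2p+1 by a list of small primes, B runs one sieve of Eratosthenes up to 2r+1 and answers each candidate with two boolean lookups; it trades per-candidate trial division for one sieve over the whole range, so it wins on wide intervals [l,r] and loses on narrow ones.
-- crash fix: For r < 0 A raises ValueError from math.isqrt(2r+1) while B returns []. — e.g. on germain_sequential(0, -1): A raises ValueError, B returns []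
import Mathlib
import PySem

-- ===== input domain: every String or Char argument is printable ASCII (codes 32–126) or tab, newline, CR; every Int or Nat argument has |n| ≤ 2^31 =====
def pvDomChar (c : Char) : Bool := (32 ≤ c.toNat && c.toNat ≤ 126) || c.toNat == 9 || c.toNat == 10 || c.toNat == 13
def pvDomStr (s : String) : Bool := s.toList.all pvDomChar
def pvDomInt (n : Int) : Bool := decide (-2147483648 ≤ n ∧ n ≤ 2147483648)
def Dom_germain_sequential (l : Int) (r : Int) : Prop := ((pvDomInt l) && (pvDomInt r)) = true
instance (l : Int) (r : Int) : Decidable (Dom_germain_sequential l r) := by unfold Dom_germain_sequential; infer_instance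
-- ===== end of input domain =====

-- B replaces A's per-candidate trial division by one Eratosthenes sieve up to 2r+1
-- with two boolean lookups per candidate (alternative algorithm, similar overall cost).

-- ===== PORT A =====

-- math.isqrt(n); A only reaches it with n ≥ 0 (r < 0, where Python raises ValueError, is outside Pre_)
def pvIsqrt (n : Int) : Int := (Int.toNat n).sqrt

-- primes_up_to: sieve of Eratosthenes.  n ≥ 2 past the guard, so all loop values are the
-- same nonnegative integers as Python's; the slice assignment sieve[p*p : n+1 : p] = 0…0
-- (Python writes exactly ((n - p*p) // p) + 1 zeros) is the fold clearing those indices.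
def primesUpTo (n : Int) : List Int :=
  if n < 2 then []
  else
    let N := n.toNat
    let sieve := ((Array.replicate (N + 1) true).setIfInBounds 0 false).setIfInBounds 1 false
    let limit := N.sqrt
    let sieve := (List.range' 2 (limit + 1 - 2)).foldl
      (fun s p =>
        if s.getD p false then
          (List.range' (p * p) ((N - p * p) / p + 1) p).foldl (fun t i => t.setIfInBounds i false) s
        else s) sieve
    ((List.range' 2 (N + 1 - 2)).filter (fun i => sieve.getD i false)).map (fun i => (i : Int))

-- is_prime_with_small_primes: the for-loop with early returns, as a recursion on the list
def isPrimeSPGo (k : Int) : List Int → Bool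
  | [] => true
  | p :: rest =>
    if k < p * p then true
    else if PySem.Int.mod k p = 0 then decide (k = p)
    else isPrimeSPGo k rest

def isPrimeSP (k : Int) (sp : List Int) : Bool :=
  if k < 2 then false else isPrimeSPGo k sp

def germain_sequential (l : Int) (r : Int) : List Int :=
  let maxQ := 2 * r + 1
  let sp := primesUpTo (pvIsqrt maxQ + 1)
  (PySem.List.pyRange l (r + 1)).foldl
    (fun out p =>
      if isPrimeSP p sp then
        if isPrimeSP (2 * p + 1) sp then out ++ [p] else out
      else out) []

-- ===== PORT B =====

-- Source B: one sieve up to n = 2r+1 (inner marking loop written out), then a filter of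
-- range(max(l,2), r+1) by two lookups.  Indices p and 2p+1 are ≥ 2 there, so .toNat is exact.
def germain_sequential_alt (l : Int) (r : Int) : List Int :=
  let n := 2 * r + 1
  if n < 5 then []
  else
    let N := n.toNat
    let isP := ((Array.replicate (N + 1) true).setIfInBounds 0 false).setIfInBounds 1 false
    let isP := (List.range' 2 (N.sqrt + 1 - 2)).foldl
      (fun s i =>
        if s.getD i false then
          (List.range' (i * i) ((N - i * i) / i + 1) i).foldl (fun t m => t.setIfInBounds m false) s
        else s) isP
    (PySem.List.pyRange (max l 2) (r + 1)).filter
      (fun p => isP.getD p.toNat false && isP.getD (2 * p + 1).toNat false)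

-- ===== PRECONDITION & SPEC =====

-- A raises ValueError (math.isqrt of the negative 2r+1) exactly when r < 0.
def Pre_germain_sequential (l : Int) (r : Int) : Prop := 0 ≤ r
instance (l : Int) (r : Int) : Decidable (Pre_germain_sequential l r) := by
  unfold Pre_germain_sequential; infer_instance

def pvWitness_germain_sequential : Int × Int := (2, 20)

-- For r < 0 A raises ValueError from math.isqrt(2r+1) while B returns [].
def Raises_germain_sequential (l : Int) (r : Int) : Prop := r < 0
instance (l : Int) (r : Int) : Decidable (Raises_germain_sequential l r) := by
  unfold Raises_germain_sequential; infer_instance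
def pvRaiseWitness_germain_sequential : Int × Int := (0, -1)
def pvRaiseWitnessOut_germain_sequential : List Int := []

def Spec_germain_sequential (l : Int) (r : Int) (out : List Int) : Prop := out = germain_sequential_alt l r
instance (l : Int) (r : Int) (out : List Int) : Decidable (Spec_germain_sequential l r out) := by unfold Spec_germain_sequential; infer_instance

-- ===== CLAIM (what is proved, stated in full; the proofs are below) =====
def Claim_equal_germain_sequential : Prop := ∀ (l : Int) (r : Int), Dom_germain_sequential l r → Pre_germain_sequential l r → Spec_germain_sequential l r (germain_sequential l r)

def Claim_raises_germain_sequential : Prop := (∀ (l : Int) (r : Int), Dom_germain_sequential l r → Raises_germain_sequential l r → ¬ Pre_germain_sequential l r) ∧ (Dom_germain_sequential (pvRaiseWitness_germain_sequential.1) (pvRaiseWitness_germain_sequential.2) ∧ Raises_germain_sequential (pvRaiseWitness_germain_sequential.1) (pvRaiseWitness_germain_sequential.2) ∧ germain_sequential_alt (pvRaiseWitness_germain_sequential.1) (pvRaiseWitness_germain_sequential.2) = pvRaiseWitnessOut_germain_sequential)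

-- ===== LEMMAS AND PROOFS =====

-- the sieve both ports build over [0, N] (their inline folds are definitionally this term)
def sieveList (N : Nat) : List Bool :=
  (List.range' 2 (N.sqrt + 1 - 2)).foldl
    (fun s p =>
      if s.getD p false then
        (List.range' (p * p) ((N - p * p) / p + 1) p).foldl (fun t i => t.set i false) s
      else s)
    (((List.replicate (N + 1) true).set 0 false).set 1 false)

-- the same sieve as the ports build it, over Array (Python's bytearray)
def sieveArr (N : Nat) : Array Bool :=
  (List.range' 2 (N.sqrt + 1 - 2)).foldl
    (fun s p =>
      if s.getD p false then
        (List.range' (p * p) ((N - p * p) / p + 1) p).foldl (fun t i => t.setIfInBounds i false) s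
      else s)
    (((Array.replicate (N + 1) true).setIfInBounds 0 false).setIfInBounds 1 false)

lemma getD_toList (a : Array Bool) (i : Nat) : a.getD i false = a.toList.getD i false := by
  rw [List.getD_eq_getElem?_getD, Array.getElem?_toList, Array.getD_eq_getD_getElem?]

lemma toList_clearFoldA (L : List Nat) (a : Array Bool) :
    (L.foldl (fun t i => t.setIfInBounds i false) a).toList
      = L.foldl (fun t i => t.set i false) a.toList := by
  induction L generalizing a with
  | nil => rfl
  | cons x L ih =>
    simp only [List.foldl_cons]
    rw [ih, Array.toList_setIfInBounds]

lemma toList_sieveAux (N : Nat) (L : List Nat) (a : Array Bool) :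
    (L.foldl
      (fun s p =>
        if s.getD p false then
          (List.range' (p * p) ((N - p * p) / p + 1) p).foldl (fun t i => t.setIfInBounds i false) s
        else s) a).toList
    = L.foldl
      (fun s p =>
        if s.getD p false then
          (List.range' (p * p) ((N - p * p) / p + 1) p).foldl (fun t i => t.set i false) s
        else s) a.toList := by
  induction L generalizing a with
  | nil => rfl
  | cons x L ih =>
    simp only [List.foldl_cons]
    rw [ih]
    congr 1
    rw [getD_toList]
    split
    · exact toList_clearFoldA _ _
    · rfl

lemma sieveArr_toList (N : Nat) : (sieveArr N).toList = sieveList N := by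
  rw [sieveArr, sieveList, toList_sieveAux]
  congr 1
  rw [Array.toList_setIfInBounds, Array.toList_setIfInBounds, Array.toList_replicate]

lemma sieveArr_getD (N j : Nat) : (sieveArr N).getD j false = (sieveList N).getD j false := by
  rw [getD_toList, sieveArr_toList]

lemma length_clearFold (L : List Nat) (s : List Bool) :
    (L.foldl (fun t i => t.set i false) s).length = s.length := by
  induction L generalizing s with
  | nil => rfl
  | cons a L ih => simp [List.foldl_cons, ih]

lemma getD_clearFold (L : List Nat) (s : List Bool) (j : Nat) :
    (L.foldl (fun t i => t.set i false) s).getD j false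
      = if j ∈ L ∧ j < s.length then false else s.getD j false := by
  induction L generalizing s with
  | nil => simp
  | cons a L ih =>
    simp only [List.foldl_cons]
    rw [ih, List.length_set]
    by_cases hja : j = a
    · subst hja
      by_cases hjl : j < s.length
      · have hset : (s.set j false).getD j false = false := by
          simp [List.getD_eq_getElem?_getD, List.getElem?_set, hjl]
        by_cases hjL : j ∈ L <;> simp [hset, hjl, hjL]
      · have hset : (s.set j false).getD j false = s.getD j false := by
          simp [List.getD_eq_getElem?_getD, List.getElem?_set, hjl]
        by_cases hjL : j ∈ L <;> simp [hset, hjl, hjL]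
    · have hset : (s.set a false).getD j false = s.getD j false := by
        simp [List.getD_eq_getElem?_getD, List.getElem?_set, Ne.symm hja]
      by_cases hjL : j ∈ L <;> by_cases hjl : j < s.length <;> simp [hset, hja, hjL, hjl, List.getElem_set, Ne.symm hja]

lemma mem_clearRange {N p j : Nat} (hp : 2 ≤ p) (hpN : p * p ≤ N) :
    j ∈ List.range' (p * p) ((N - p * p) / p + 1) p ↔ p ∣ j ∧ p * p ≤ j ∧ j ≤ N := by
  rw [List.mem_range']
  constructor
  · rintro ⟨i, hi, rfl⟩
    refine ⟨⟨p + i, by ring⟩, Nat.le_add_right _ _, ?_⟩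
    have : i ≤ (N - p * p) / p := by omega
    have hd : p * ((N - p * p) / p) ≤ N - p * p := by
      rw [Nat.mul_comm]; exact Nat.div_mul_le_self _ _
    have h2 : p * i ≤ N - p * p := le_trans (Nat.mul_le_mul_left _ this) hd
    omega
  · rintro ⟨⟨c, rfl⟩, hle, hub⟩
    have hcp : p ≤ c := by
      by_contra h
      push Not at h
      have : p * c < p * p := mul_lt_mul_of_pos_left h (by omega : (0:Nat) < p)
      omega
    have h3 : (c - p) * p ≤ N - p * p := by
      rw [Nat.sub_mul, Nat.mul_comm c p]; omega
    have h4 := (Nat.le_div_iff_mul_le (by omega : 0 < p)).2 h3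
    refine ⟨c - p, by omega, ?_⟩
    rw [Nat.mul_sub]
    omega

lemma length_sieve_inv (N : Nat) (c : Nat) :
    ((List.range' 2 c).foldl
      (fun s p =>
        if s.getD p false then
          (List.range' (p * p) ((N - p * p) / p + 1) p).foldl (fun t i => t.set i false) s
        else s)
      (((List.replicate (N + 1) true).set 0 false).set 1 false)).length = N + 1 := by
  induction c with
  | zero => simp
  | succ c ih =>
    rw [List.range'_concat, List.foldl_append, List.foldl_cons, List.foldl_nil]
    split
    · rw [length_clearFold, ih]
    · exact ih

-- invariant of the outer sieve loop after the first c iterations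
lemma sieve_inv (N : Nat) (hN : 2 ≤ N) :
    ∀ (c : Nat), 2 + c ≤ N.sqrt + 1 → ∀ (j : Nat),
    ((List.range' 2 c).foldl
      (fun s p =>
        if s.getD p false then
          (List.range' (p * p) ((N - p * p) / p + 1) p).foldl (fun t i => t.set i false) s
        else s)
      (((List.replicate (N + 1) true).set 0 false).set 1 false)).getD j false
    = decide (2 ≤ j ∧ j ≤ N ∧ ∀ d, d < 2 + c → 2 ≤ d → d ∣ j → j < d * d) := by
  intro c
  induction c with
  | zero =>
    intro _ j
    simp only [List.range'_zero, List.foldl_nil]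
    rcases Nat.lt_or_ge j 2 with h | h
    · have : j = 0 ∨ j = 1 := by omega
      rcases this with rfl | rfl <;>
        simp [List.getD_eq_getElem?_getD, List.length_set,
          List.length_replicate, show 0 < N by omega]
    · by_cases hjN : j ≤ N
      · have hlt : j < N + 1 := by omega
        simp only [List.getD_eq_getElem?_getD, List.getElem?_set, List.length_set,
          List.length_replicate, List.getElem?_replicate,
          if_neg (by omega : ¬ (1:Nat) = j), if_neg (by omega : ¬ (0:Nat) = j), if_pos hlt]
        simp only [Option.getD_some]
        symm
        simp only [decide_eq_true_eq]
        exact ⟨h, hjN, fun d hd hd2 _ => by omega⟩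
      · simp only [List.getD_eq_getElem?_getD, List.getElem?_set, List.length_set,
          List.length_replicate, List.getElem?_replicate,
          if_neg (by omega : ¬ (1:Nat) = j), if_neg (by omega : ¬ (0:Nat) = j),
          if_neg (by omega : ¬ j < N + 1)]
        symm
        simp only [Option.getD_none, decide_eq_false_iff_not]
        rintro ⟨_, hc, _⟩
        omega
  | succ c ih =>
    intro hc j
    have hc' : 2 + c ≤ N.sqrt + 1 := by omega
    have hp : 2 + c ≤ N.sqrt := by omega
    have hsqN : N.sqrt * N.sqrt ≤ N := by
      have := Nat.sqrt_le' N
      nlinarith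
    have hpp : (2 + c) * (2 + c) ≤ N := le_trans (Nat.mul_le_mul hp hp) hsqN
    have hpN : 2 + c ≤ N := le_trans hp (Nat.sqrt_le_self N)
    have hlen := length_sieve_inv N c
    rw [List.range'_concat, List.foldl_append, List.foldl_cons, List.foldl_nil,
      Nat.one_mul]
    rw [ih hc' (2 + c)]
    by_cases hg : ∀ d, d < 2 + c → 2 ≤ d → d ∣ (2 + c) → (2 + c) < d * d
    · rw [if_pos (by simp only [decide_eq_true_eq]; exact ⟨by omega, hpN, hg⟩)]
      rw [getD_clearFold, hlen]
      by_cases hjc : (2 + c) ∣ j ∧ (2 + c) * (2 + c) ≤ j ∧ j ≤ N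
      · rw [if_pos ⟨(mem_clearRange (by omega) hpp).2 hjc, by omega⟩]
        symm
        simp only [decide_eq_false_iff_not]
        rintro ⟨-, -, hall⟩
        have := hall (2 + c) (by omega) (by omega) hjc.1
        omega
      · rw [if_neg (fun hmem => hjc ((mem_clearRange (by omega) hpp).1 hmem.1))]
        rw [ih hc' j]
        simp only [decide_eq_decide]
        constructor
        · rintro ⟨h2j, hjN, hall⟩
          refine ⟨h2j, hjN, fun d hd hd2 hdj => ?_⟩
          rcases Nat.lt_or_ge d (2 + c) with hlt | hge
          · exact hall d hlt hd2 hdj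
          · have hd' : d = 2 + c := by omega
            subst hd'
            by_contra hge2
            exact hjc ⟨hdj, by omega, hjN⟩
        · rintro ⟨h2j, hjN, hall⟩
          exact ⟨h2j, hjN, fun d hd hd2 hdj => hall d (by omega) hd2 hdj⟩
    · rw [if_neg (by simp only [decide_eq_true_eq]; rintro ⟨-, -, h⟩; exact hg h)]
      rw [ih hc' j]
      have hex : ∃ d0, d0 < 2 + c ∧ 2 ≤ d0 ∧ d0 ∣ (2 + c) ∧ d0 * d0 ≤ 2 + c := by
        by_contra hno
        push Not at hno
        exact hg (fun d hd hd2 hdp => by have := hno d hd hd2 hdp; omega)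
      obtain ⟨d0, hd0c, hd02, hd0p, hd0sq⟩ := hex
      simp only [decide_eq_decide]
      constructor
      · rintro ⟨h2j, hjN, hall⟩
        refine ⟨h2j, hjN, fun d hd hd2 hdj => ?_⟩
        rcases Nat.lt_or_ge d (2 + c) with hlt | hge
        · exact hall d hlt hd2 hdj
        · have hd' : d = 2 + c := by omega
          subst hd'
          by_contra hge2
          have hd0j : d0 ∣ j := dvd_trans hd0p hdj
          have hj1 := hall d0 hd0c hd02 hd0j
          have hple : 2 + c ≤ (2 + c) * (2 + c) :=
            Nat.le_mul_of_pos_left _ (by omega)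
          omega
      · rintro ⟨h2j, hjN, hall⟩
        exact ⟨h2j, hjN, fun d hd hd2 hdj => hall d (by omega) hd2 hdj⟩

lemma prime_iff_no_small_div (N j : Nat) (h2 : 2 ≤ j) (hjN : j ≤ N) :
    (∀ d, 2 ≤ d → d < N.sqrt + 1 → d ∣ j → j < d * d) ↔ Nat.Prime j := by
  constructor
  · intro h
    by_contra hnp
    have hq := Nat.minFac_prime (by omega : j ≠ 1)
    have hqd := Nat.minFac_dvd j
    have hqsq : j.minFac * j.minFac ≤ j := by
      have := Nat.minFac_sq_le_self (by omega : 0 < j) hnp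
      nlinarith [this, sq (j.minFac)]
    have hqs : j.minFac ≤ N.sqrt := Nat.le_sqrt.2 (le_trans hqsq hjN)
    exact absurd (h j.minFac hq.two_le (by omega) hqd) (by omega)
  · intro hp d hd2 _ hdj
    rcases (Nat.Prime.eq_one_or_self_of_dvd hp d hdj) with h1 | h1
    · omega
    · subst h1; nlinarith

lemma sieve_correct (N : Nat) (hN : 2 ≤ N) (j : Nat) :
    (sieveList N).getD j false = decide (2 ≤ j ∧ j ≤ N ∧ Nat.Prime j) := by
  have h1 : 1 ≤ N.sqrt := Nat.le_sqrt.2 (by omega)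
  have hrw := sieve_inv N hN (N.sqrt + 1 - 2) (by omega) j
  rw [sieveList, hrw]
  simp only [decide_eq_decide]
  constructor
  · rintro ⟨a, b, h⟩
    exact ⟨a, b, (prime_iff_no_small_div N j a b).1 (fun d hd2 hdlt hdj => h d (by omega) hd2 hdj)⟩
  · rintro ⟨a, b, hp⟩
    exact ⟨a, b, fun d hdlt hd2 hdj => (prime_iff_no_small_div N j a b).2 hp d hd2 (by omega) hdj⟩

-- the primes in [2, M], as naturals
def primesNat (M : Nat) : List Nat :=
  (List.range' 2 (M + 1 - 2)).filter (fun i => decide (Nat.Prime i))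

lemma mem_primesNat {M q : Nat} (hM : 2 ≤ M) : q ∈ primesNat M ↔ q ≤ M ∧ Nat.Prime q := by
  simp only [primesNat, List.mem_filter, List.mem_range'_1, decide_eq_true_eq]
  constructor
  · rintro ⟨⟨_, h⟩, hp⟩; exact ⟨by omega, hp⟩
  · rintro ⟨h, hp⟩; exact ⟨⟨hp.two_le, by omega⟩, hp⟩

lemma pairwise_primesNat (M : Nat) : (primesNat M).Pairwise (· < ·) :=
  (List.pairwise_lt_range' 1).filter _

lemma primesUpTo_eq (m : Int) (hm : 2 ≤ m) :
    primesUpTo m = (primesNat m.toNat).map (fun q => (q : Int)) := by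
  rw [primesUpTo, if_neg (by omega)]
  show ((List.range' 2 (m.toNat + 1 - 2)).filter
      (fun i => (sieveArr m.toNat).getD i false)).map (fun i => (i : Int)) = _
  rw [primesNat]
  have hN2 : 2 ≤ m.toNat := by omega
  have hfc : ∀ x ∈ List.range' 2 (m.toNat + 1 - 2),
      ((sieveArr m.toNat).getD x false) = decide (Nat.Prime x) := by
    intro x hx
    rw [List.mem_range'_1] at hx
    rw [sieveArr_getD, sieve_correct _ hN2 x]
    simp only [decide_eq_decide]
    constructor
    · rintro ⟨-, -, h⟩; exact h
    · intro h; exact ⟨by omega, by omega, h⟩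
  rw [List.filter_congr hfc]

-- k prime ⇒ the trial-division loop answers true on any list of primes
lemma go_true (k : Int) (hk : 2 ≤ k) (hkp : Nat.Prime k.toNat) (L : List Nat)
    (hL : ∀ q ∈ L, Nat.Prime q) :
    isPrimeSPGo k (L.map (fun q => (q : Int))) = true := by
  induction L with
  | nil => rfl
  | cons q L ih =>
    show isPrimeSPGo k ((q:Int) :: L.map (fun q => (q:Int))) = true
    rw [isPrimeSPGo]
    split
    · rfl
    · rename_i hlt
      by_cases hdvd : PySem.Int.mod k (q : Int) = 0
      · rw [if_pos hdvd]
        rw [PySem.Int.mod_eq_zero_iff_dvd] at hdvd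
        have hq := hL q (by simp)
        have hk' : k = ((k.toNat : Nat) : Int) := by omega
        rw [hk'] at hdvd
        have hqd : q ∣ k.toNat := Int.ofNat_dvd.mp hdvd
        rcases (Nat.Prime.eq_one_or_self_of_dvd hkp q hqd) with h1 | h1
        · exact absurd h1 (by have := hq.two_le; omega)
        · simp only [decide_eq_true_eq]
          omega
      · rw [if_neg hdvd]
        exact ih (fun q hq => hL q (List.mem_cons_of_mem _ hq))

-- k composite ⇒ the loop answers false, provided its least prime factor is in the (sorted) list
lemma go_false (k : Int) (hk : 2 ≤ k) (hnp : ¬ Nat.Prime k.toNat) (L : List Nat)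
    (hL : ∀ q ∈ L, Nat.Prime q) (hsort : L.Pairwise (· < ·))
    (hmem : k.toNat.minFac ∈ L) :
    isPrimeSPGo k (L.map (fun q => (q : Int))) = false := by
  induction L with
  | nil => cases hmem
  | cons q L ih =>
    have hK2 : 2 ≤ k.toNat := by omega
    have hkK : k = ((k.toNat : Nat) : Int) := by omega
    have hq0p := Nat.minFac_prime (show k.toNat ≠ 1 by omega)
    have hq0d := Nat.minFac_dvd k.toNat
    have hq0sq : k.toNat.minFac * k.toNat.minFac ≤ k.toNat := by
      have := Nat.minFac_sq_le_self (by omega : 0 < k.toNat) hnp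
      nlinarith
    have hq0lt : k.toNat.minFac < k.toNat := by
      rcases Nat.lt_or_ge k.toNat.minFac k.toNat with h | h
      · exact h
      · have heq : k.toNat.minFac = k.toNat :=
          le_antisymm (Nat.le_of_dvd (by omega) hq0d) h
        rw [heq] at hq0p
        exact absurd hq0p hnp
    show isPrimeSPGo k ((q : Int) :: L.map (fun q => (q : Int))) = false
    rw [isPrimeSPGo]
    rcases List.mem_cons.mp hmem with hq | hq
    · subst hq
      rw [if_neg, if_pos]
      · simp only [decide_eq_false_iff_not]
        intro he
        omega
      · rw [PySem.Int.mod_eq_zero_iff_dvd]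
        have hdvdInt : ((k.toNat.minFac : Nat) : Int) ∣ ((k.toNat : Nat) : Int) :=
          Int.natCast_dvd_natCast.mpr hq0d
        rw [← hkK] at hdvdInt
        exact hdvdInt
      · intro hlt
        have h2 : ((k.toNat.minFac * k.toNat.minFac : Nat) : Int) ≤ ((k.toNat : Nat) : Int) :=
          Int.ofNat_le.mpr hq0sq
        rw [← hkK] at h2
        push_cast at h2
        linarith
    · have hqlt : q < k.toNat.minFac := (List.pairwise_cons.mp hsort).1 _ hq
      have hqprime := hL q (by simp)
      have hnq : ¬ (q ∣ k.toNat) := fun hd =>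
        absurd (Nat.minFac_le_of_dvd hqprime.two_le hd) (by omega)
      rw [if_neg, if_neg]
      · exact ih (fun x hx => hL x (by simp [hx])) (List.pairwise_cons.mp hsort).2 hq
      · rw [PySem.Int.mod_eq_zero_iff_dvd]
        intro hd
        rw [hkK] at hd
        exact hnq (Int.ofNat_dvd.mp hd)
      · intro hlt
        have hqq : q * q < k.toNat := lt_of_lt_of_le (Nat.mul_lt_mul'' hqlt hqlt) hq0sq
        have h2 : ((q * q : Nat) : Int) < ((k.toNat : Nat) : Int) := Int.ofNat_lt.mpr hqq
        rw [← hkK] at h2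
        push_cast at h2
        linarith

lemma isPrimeSP_correct (k : Int) (M : Nat) (hM : 2 ≤ M) (hk2 : 2 ≤ k)
    (hsq : Nat.sqrt k.toNat ≤ M) :
    isPrimeSP k ((primesNat M).map (fun q => (q : Int))) = decide (Nat.Prime k.toNat) := by
  rw [isPrimeSP, if_neg (by omega)]
  by_cases hp : Nat.Prime k.toNat
  · rw [go_true k hk2 hp _ (fun q hq => ((mem_primesNat hM).1 hq).2)]
    simp [hp]
  · rw [go_false k hk2 hp _ (fun q hq => ((mem_primesNat hM).1 hq).2) (pairwise_primesNat M) ?_]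
    · simp [hp]
    · have hK : 2 ≤ k.toNat := by omega
      have hq := Nat.minFac_prime (by omega : k.toNat ≠ 1)
      have hsqle : k.toNat.minFac * k.toNat.minFac ≤ k.toNat := by
        have := Nat.minFac_sq_le_self (by omega : 0 < k.toNat) hp
        nlinarith
      exact (mem_primesNat hM).2 ⟨le_trans (Nat.le_sqrt.2 hsqle) hsq, hq⟩

lemma isPrimeSP_small (k : Int) (hk : k < 2) (sp : List Int) : isPrimeSP k sp = false := by
  rw [isPrimeSP, if_pos hk]

-- the canonical Germain predicate
def germB (p : Int) : Bool := decide (2 ≤ p ∧ Nat.Prime p.toNat ∧ Nat.Prime (2 * p + 1).toNat)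

lemma germB_eq_of_two_le {p : Int} (h2 : 2 ≤ p) :
    germB p = (decide (Nat.Prime p.toNat) && decide (Nat.Prime (2 * p + 1).toNat)) := by
  simp [germB, Bool.decide_and, h2]

lemma portA_eq_filter (l r : Int) (hr : 0 ≤ r) :
    germain_sequential l r = (PySem.List.pyRange l (r + 1)).filter germB := by
  have hsq1 : (1 : Int) ≤ ((2 * r + 1).toNat.sqrt : Int) := by
    have : 1 ≤ (2 * r + 1).toNat.sqrt := Nat.le_sqrt.2 (by omega)
    omega
  have hm2 : 2 ≤ pvIsqrt (2 * r + 1) + 1 := by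
    unfold pvIsqrt
    omega
  have hMv : (pvIsqrt (2 * r + 1) + 1).toNat = (2 * r + 1).toNat.sqrt + 1 := by
    unfold pvIsqrt
    omega
  show (PySem.List.pyRange l (r + 1)).foldl
      (fun out p =>
        if isPrimeSP p (primesUpTo (pvIsqrt (2 * r + 1) + 1)) then
          if isPrimeSP (2 * p + 1) (primesUpTo (pvIsqrt (2 * r + 1) + 1)) then out ++ [p] else out
        else out) [] = _
  rw [primesUpTo_eq _ hm2]
  have hfun : (fun (out : List Int) (p : Int) =>
      if isPrimeSP p ((primesNat (pvIsqrt (2 * r + 1) + 1).toNat).map (fun q => (q : Int))) then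
        if isPrimeSP (2 * p + 1) ((primesNat (pvIsqrt (2 * r + 1) + 1).toNat).map (fun q => (q : Int))) then out ++ [p] else out
      else out)
      = (fun (out : List Int) (p : Int) =>
        if (isPrimeSP p ((primesNat (pvIsqrt (2 * r + 1) + 1).toNat).map (fun q => (q : Int)))
            && isPrimeSP (2 * p + 1) ((primesNat (pvIsqrt (2 * r + 1) + 1).toNat).map (fun q => (q : Int)))) then out ++ [p] else out) := by
    funext out p
    rcases Bool.eq_false_or_eq_true (isPrimeSP p ((primesNat (pvIsqrt (2 * r + 1) + 1).toNat).map (fun q => (q : Int)))) with h1 | h1 <;>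
      rcases Bool.eq_false_or_eq_true (isPrimeSP (2 * p + 1) ((primesNat (pvIsqrt (2 * r + 1) + 1).toNat).map (fun q => (q : Int)))) with h2 | h2 <;>
      rw [h1, h2] <;> rfl
  rw [hfun, PySem.List.foldl_append_if _ (fun p => p)]
  rw [List.nil_append, List.map_id']
  apply List.filter_congr
  intro p hp
  rw [PySem.List.mem_pyRange_one] at hp
  have hM2 : 2 ≤ (pvIsqrt (2 * r + 1) + 1).toNat := by omega
  by_cases h2 : 2 ≤ p
  · have hs1 : Nat.sqrt p.toNat ≤ (pvIsqrt (2 * r + 1) + 1).toNat := by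
      have : p.toNat ≤ (2 * r + 1).toNat := by omega
      have := Nat.sqrt_le_sqrt this
      omega
    have hs2 : Nat.sqrt (2 * p + 1).toNat ≤ (pvIsqrt (2 * r + 1) + 1).toNat := by
      have : (2 * p + 1).toNat ≤ (2 * r + 1).toNat := by omega
      have := Nat.sqrt_le_sqrt this
      omega
    rw [isPrimeSP_correct p _ hM2 h2 hs1, isPrimeSP_correct (2 * p + 1) _ hM2 (by omega) hs2]
    rw [germB_eq_of_two_le h2]
  · rw [isPrimeSP_small p (by omega), Bool.false_and]
    symm
    simp only [germB, decide_eq_false_iff_not]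
    rintro ⟨h, -⟩
    omega

lemma portB_eq_filter (l r : Int) (hr : 0 ≤ r) :
    germain_sequential_alt l r = (PySem.List.pyRange l (r + 1)).filter germB := by
  unfold germain_sequential_alt
  by_cases h5 : 2 * r + 1 < 5
  · rw [if_pos h5]
    symm
    rw [List.filter_eq_nil_iff]
    intro p hp
    rw [PySem.List.mem_pyRange_one] at hp
    simp only [germB, decide_eq_true_eq]
    rintro ⟨h2, -⟩
    omega
  · rw [if_neg h5]
    have hr2 : 2 ≤ r := by omega
    have hN2 : 2 ≤ (2 * r + 1).toNat := by omega
    show (PySem.List.pyRange (max l 2) (r + 1)).filter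
        (fun p => (sieveArr (2 * r + 1).toNat).getD p.toNat false
          && (sieveArr (2 * r + 1).toNat).getD (2 * p + 1).toNat false) = _
    have hfc : (PySem.List.pyRange (max l 2) (r + 1)).filter
        (fun p => (sieveArr (2 * r + 1).toNat).getD p.toNat false
          && (sieveArr (2 * r + 1).toNat).getD (2 * p + 1).toNat false)
        = (PySem.List.pyRange (max l 2) (r + 1)).filter germB := by
      apply List.filter_congr
      intro p hp
      rw [PySem.List.mem_pyRange_one] at hp
      have h2 : 2 ≤ p := le_trans (le_max_right l 2) hp.1
      rw [sieveArr_getD, sieveArr_getD, sieve_correct _ hN2, sieve_correct _ hN2,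
        germB_eq_of_two_le h2]
      have c1 : 2 ≤ p.toNat ∧ p.toNat ≤ (2 * r + 1).toNat := by omega
      have c2 : 2 ≤ (2 * p + 1).toNat ∧ (2 * p + 1).toNat ≤ (2 * r + 1).toNat := by omega
      congr 1
      · simp only [decide_eq_decide]
        exact ⟨fun h => h.2.2, fun h => ⟨c1.1, c1.2, h⟩⟩
      · simp only [decide_eq_decide]
        exact ⟨fun h => h.2.2, fun h => ⟨c2.1, c2.2, h⟩⟩
    rw [hfc]
    by_cases hl : 2 ≤ l
    · rw [max_eq_left hl]
    · rw [max_eq_right (by omega : l ≤ 2),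
        PySem.List.pyRange_one_append l 2 (r + 1) (by omega) (by omega),
        List.filter_append]
      have h0 : (PySem.List.pyRange l 2).filter germB = [] := by
        rw [List.filter_eq_nil_iff]
        intro p hp
        rw [PySem.List.mem_pyRange_one] at hp
        simp only [germB, decide_eq_true_eq]
        rintro ⟨h2, -⟩
        omega
      rw [h0, List.nil_append]

-- ===== VERDICT (by name: the statement is the Claim_ definition above) =====
theorem germain_sequential_spec : Claim_equal_germain_sequential := by
  intro l r _ hr
  unfold Spec_germain_sequential
  rw [portA_eq_filter l r hr, portB_eq_filter l r hr]

@[simp] theorem germain_sequential_raises : Claim_raises_germain_sequential := by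
  unfold Claim_raises_germain_sequential
  constructor
  · intro l r _ h hpre
    exact absurd hpre (by unfold Pre_germain_sequential Raises_germain_sequential at *; omega)
  · exact ⟨by decide, by decide, by decide⟩
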